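-- pv_equiv track=rewrite | github.com/mrk7217/usgsOntosoft | USGSProjectAnalysis.py | formatOS
-- ===== SOURCE A (Python) =====
-- def formatOS(osString):
--     ''' This function takes in an osString which may have multiple OSes separated
--     by '/' and puts them into the list. Also changes OS abbreviations as specified
--     on USGS website and puts them into full form
--     Input: string of OS abbreviations
--     Output: list of OS full names'''
--     if osString == '':
--         numOS = 0
--     else:
--         numOS = 1 + osString.count('/')
--     os = []
--     while numOS > 0:
--         if numOS == 1:
--             osAbbrev = osString
--         else:
--             ind = osString.index('/')
--             osAbbrev = osString[0:ind]
--             osString = osString[ind+1:]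
--         osName = fullName(osAbbrev)
--         os += [osName]
--         numOS -= 1
--     return os
--
-- def fullName(osAbbrev):
--     ''' Given an OS abbreviation, returns the full OS name. OS names and abbreviations
--     given by https://water.usgs.gov/software/lists/alphabetical under 'Abbreviations for OSs section'
--     Input: string osAbbrev
--     Output: string osName'''
--     osName = osAbbrev
--     OSs = {'DOS':'IBM-compatible PC', 'DG':'Data General AViiON DG/UX', 'Mac':'Macintosh',\
--            'SGI': 'Silicon Graphics Indigo', 'Sun': 'Sun SPARCstation Solaris', 'Win': 'Microsoft Windows'}
--     if osAbbrev in OSs: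
--         osName = OSs[osAbbrev]
--     return osName
-- ===== SOURCE B (Python) =====
-- _OS_NAMES = {'DOS': 'IBM-compatible PC', 'DG': 'Data General AViiON DG/UX', 'Mac': 'Macintosh',
--              'SGI': 'Silicon Graphics Indigo', 'Sun': 'Sun SPARCstation Solaris', 'Win': 'Microsoft Windows'}
--
-- def formatOS(osString):
--     if osString == '':
--         return []
--     return [_OS_NAMES.get(p, p) for p in osString.split('/')]
-- ===== Notes on version B (the rewrite author's own statement) =====
-- stated objective: simpler
-- what changed: Replaces the counted while-loop that repeatedly finds the separator index and re-slices the tail with a single split followed by one dict-get map over the pieces.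
import Mathlib
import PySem

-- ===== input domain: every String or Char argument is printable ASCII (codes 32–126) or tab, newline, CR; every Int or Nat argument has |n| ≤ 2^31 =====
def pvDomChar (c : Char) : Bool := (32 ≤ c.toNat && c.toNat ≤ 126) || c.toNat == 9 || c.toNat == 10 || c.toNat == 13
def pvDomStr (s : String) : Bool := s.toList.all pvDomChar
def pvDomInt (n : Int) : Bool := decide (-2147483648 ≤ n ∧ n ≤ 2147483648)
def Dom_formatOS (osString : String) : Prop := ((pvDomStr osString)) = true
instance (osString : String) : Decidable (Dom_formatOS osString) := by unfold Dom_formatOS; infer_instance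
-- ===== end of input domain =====

-- B replaces A's counted while-loop (index + re-slice of the tail) by one split('/') and a map; objective: simpler.

-- ===== PORT A =====
-- the abbreviation table of A's helper fullName
def pvOSs : PySem.Dict String String :=
  PySem.Dict.ofList [("DOS", "IBM-compatible PC"), ("DG", "Data General AViiON DG/UX"),
    ("Mac", "Macintosh"), ("SGI", "Silicon Graphics Indigo"),
    ("Sun", "Sun SPARCstation Solaris"), ("Win", "Microsoft Windows")]

def fullName (osAbbrev : String) : String :=
  let osName := osAbbrev
  if pvOSs.contains osAbbrev then (pvOSs.get? osAbbrev).getD osName else osName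

-- A's while-loop, recursion on numOS; osString.index('/') is Str.find here: '/' is
-- present whenever the loop takes that branch (numOS > 1), so index never raises.
def formatOSLoop : Nat → String → List String → List String
  | 0, _, os => os
  | Nat.succ n, osString, os =>
    if n + 1 = 1 then
      formatOSLoop n osString (os ++ [fullName osString])
    else
      let ind : Int := PySem.Str.find osString "/"
      let osAbbrev := PySem.Str.slice osString (some 0) (some ind)
      let osString' := PySem.Str.slice osString (some (ind + 1)) none
      formatOSLoop n osString' (os ++ [fullName osAbbrev])

def formatOS (osString : String) : List String :=
  let numOS : Nat := if osString == "" then 0 else 1 + PySem.Str.count osString "/"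
  formatOSLoop numOS osString []

-- ===== PORT B =====
-- B's module-level abbreviation table (_OS_NAMES in Source B)
def pvOSNames : PySem.Dict String String :=
  PySem.Dict.ofList [("DOS", "IBM-compatible PC"), ("DG", "Data General AViiON DG/UX"),
    ("Mac", "Macintosh"), ("SGI", "Silicon Graphics Indigo"),
    ("Sun", "Sun SPARCstation Solaris"), ("Win", "Microsoft Windows")]

def formatOS_alt (osString : String) : List String :=
  if osString == "" then []
  else ((PySem.Str.split? osString "/").getD []).map (fun p => pvOSNames.getD p p)

-- ===== PRECONDITION & SPEC =====
def Spec_formatOS (osString : String) (out : List String) : Prop := out = formatOS_alt osString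
instance (osString : String) (out : List String) : Decidable (Spec_formatOS osString out) := by unfold Spec_formatOS; infer_instance

-- ===== CLAIM (what is proved, stated in full; the proofs are below) =====
def Claim_equal_formatOS : Prop := ∀ (osString : String), Dom_formatOS osString → Spec_formatOS osString (formatOS osString)

-- ===== LEMMAS AND PROOFS =====

-- A's fullName is B's dict-get
lemma fullName_eq_getD (a : String) : fullName a = pvOSNames.getD a a := by
  unfold fullName
  have hdict : pvOSNames = pvOSs := rfl
  rw [hdict]
  rw [PySem.Dict.getD_eq_get?_getD, PySem.Dict.contains_eq_isSome_get?]
  cases h : pvOSs.get? a <;> simp [h]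

-- structural characterisation of splitting on '/'
def pvSplit (cur : List Char) : List Char → List (List Char)
  | [] => [cur]
  | x :: t => if x = '/' then cur :: pvSplit [] t else pvSplit (cur ++ [x]) t

lemma countgo (c : Char) : ∀ (l : List Char) (fuel acc : Nat), l.length ≤ fuel →
    PySem.Chars.count.go [c] fuel l acc = acc + l.count c := by
  intro l
  induction l with
  | nil => intro fuel acc h; cases fuel <;> simp [PySem.Chars.count.go]
  | cons x t ih =>
    intro fuel acc h
    cases fuel with
    | zero => simp at h
    | succ f =>
      simp only [PySem.Chars.count.go, List.isPrefixOf, Bool.and_true,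
        List.length_cons, List.drop_succ_cons, List.length_nil, List.drop_zero]
      simp only [List.length_cons, Nat.succ_le_succ_iff] at h
      by_cases hx : c = x
      · subst hx
        rw [if_pos (by simp), ih _ _ h]
        simp; omega
      · rw [if_neg (by simpa using hx), ih _ _ h]
        simp [Ne.symm hx]

lemma count_char (c : Char) (l : List Char) : PySem.Chars.count l [c] = l.count c := by
  simpa [PySem.Chars.count] using countgo c l l.length 0 le_rfl

lemma findgo (c : Char) : ∀ (l : List Char) (k : Nat),
    PySem.Chars.find.go [c] l k = if c ∈ l then ((k + l.idxOf c : Nat) : Int) else -1 := by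
  intro l
  induction l with
  | nil => intro k; simp [PySem.Chars.find.go]
  | cons x t ih =>
    intro k
    simp only [PySem.Chars.find.go, List.isPrefixOf, Bool.and_true]
    by_cases hx : c = x
    · subst hx; simp [List.idxOf_cons_self]
    · rw [if_neg (by simpa using hx)]
      rw [ih]
      have hne : x ≠ c := fun h' => hx h'.symm
      simp only [List.mem_cons, List.idxOf_cons_ne _ (by simpa using hne)]
      by_cases hm : c ∈ t
      · rw [if_pos hm, if_pos (Or.inr hm)]; push_cast; ring
      · rw [if_neg hm, if_neg (by simp [hx, hm])]

lemma find_char (c : Char) (l : List Char) (h : c ∈ l) :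
    PySem.Chars.find l [c] = (l.idxOf c : Int) := by
  simp [PySem.Chars.find, findgo c l 0, h]

lemma splitgo : ∀ (l : List Char) (fuel : Nat) (cur : List Char)
    (acc : List (List Char)), l.length < fuel →
    PySem.Chars.splitOn.go ['/'] fuel l cur acc = acc.reverse ++ pvSplit cur.reverse l := by
  intro l
  induction l with
  | nil =>
    intro fuel cur acc h
    cases fuel with
    | zero => omega
    | succ f => simp [PySem.Chars.splitOn.go, pvSplit]
  | cons x t ih =>
    intro fuel cur acc h
    cases fuel with
    | zero => omega
    | succ f =>
      simp only [List.length_cons, Nat.succ_lt_succ_iff] at h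
      simp only [PySem.Chars.splitOn.go, List.isPrefixOf, Bool.and_true,
        List.length_cons, List.drop_succ_cons, List.length_nil, List.drop_zero, pvSplit]
      by_cases hx : x = '/'
      · subst hx
        rw [if_pos (by simp), if_pos rfl, ih _ _ _ h]
        simp
      · rw [if_neg (by simpa using fun h' => hx h'.symm), if_neg hx, ih _ _ _ h]
        simp

lemma splitOn_char (l : List Char) :
    PySem.Chars.splitOn l ['/'] = pvSplit [] l := by
  simpa [PySem.Chars.splitOn] using splitgo l (l.length + 1) [] [] (by omega)

lemma pvSplit_step (c l cur) (hc : c = '/') :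
    pvSplit cur l = if '/' ∈ l then (cur ++ l.take (l.idxOf '/')) :: pvSplit [] (l.drop (l.idxOf '/' + 1))
      else [cur ++ l] := by
  subst hc
  induction l generalizing cur with
  | nil => simp [pvSplit]
  | cons x t ih =>
    by_cases hx : x = '/'
    · subst hx; simp [pvSplit, List.idxOf_cons_self]
    · have hne : ('/' : Char) ≠ x := fun h' => hx h'.symm
      simp only [pvSplit, if_neg hx, List.mem_cons, ih,
        List.idxOf_cons_ne _ (by simpa using hx)]
      by_cases hm : '/' ∈ t
      · simp [hm, hne, List.append_assoc]
      · simp [hm, hne, List.append_assoc]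

lemma count_drop (l : List Char) (h : '/' ∈ l) :
    l.count '/' = 1 + (l.drop (l.idxOf '/' + 1)).count '/' := by
  induction l with
  | nil => simp at h
  | cons x t ih =>
    by_cases hx : x = '/'
    · subst hx; simp [List.idxOf_cons_self, List.count_cons]; omega
    · have hm : '/' ∈ t := by
        rcases List.mem_cons.mp h with h' | h'
        · exact absurd h'.symm hx
        · exact h'
      rw [List.idxOf_cons_ne _ (by simpa using hx)]
      simp only [List.count_cons, List.drop_succ_cons]
      rw [ih hm]
      simp [hx]

lemma loop_eq : ∀ (n : Nat) (S : String) (os : List String),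
    S.toList.count '/' = n →
    formatOSLoop (n + 1) S os
      = os ++ (pvSplit [] S.toList).map (fun l => pvOSNames.getD (String.ofList l) (String.ofList l)) := by
  intro n
  induction n with
  | zero =>
    intro S os h
    have hm : ('/' : Char) ∉ S.toList := by
      intro hmem
      have := List.count_pos_iff.mpr hmem
      omega
    rw [formatOSLoop, if_pos rfl, formatOSLoop]
    rw [pvSplit_step '/' S.toList [] rfl, if_neg hm]
    rw [fullName_eq_getD]
    simp only [List.map_cons, List.map_nil, List.nil_append, String.ofList_toList]
  | succ n ih =>
    intro S os h
    have hm : ('/' : Char) ∈ S.toList := by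
      by_contra hmem
      rw [List.count_eq_zero_of_not_mem hmem] at h
      omega
    have hfind : PySem.Str.find S "/" = (S.toList.idxOf '/' : Int) := by
      rw [PySem.Str.find_eq]
      exact find_char '/' S.toList hm
    rw [formatOSLoop]
    rw [if_neg (by omega : ¬ n + 1 + 1 = 1), hfind]
    set i := S.toList.idxOf '/' with hi
    have habbrev : (PySem.Str.slice S (some 0) (some (i : Int))).toList = S.toList.take i := by
      rw [PySem.Str.toList_slice]
      simp [PySem.Chars.slice_eq_listSlice, PySem.List.slice_to_natCast]
    have htail : (PySem.Str.slice S (some ((i : Int) + 1)) none).toList = S.toList.drop (i + 1) := by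
      have hcast : ((i : Int) + 1) = ((i + 1 : Nat) : Int) := by push_cast; ring
      rw [PySem.Str.toList_slice, PySem.Chars.slice_eq_listSlice, hcast,
        PySem.List.slice_from_natCast]
    have hcnt : (S.toList.drop (i + 1)).count '/' = n := by
      have hc := count_drop S.toList hm
      rw [← hi] at hc
      omega
    rw [ih _ _ (by rw [htail]; exact hcnt)]
    rw [htail]
    rw [pvSplit_step '/' S.toList [] rfl, if_pos hm]
    have harg : PySem.Str.slice S (some 0) (some (i : Int)) = String.ofList (S.toList.take i) := by
      rw [← habbrev, String.ofList_toList]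
    rw [harg, fullName_eq_getD]
    simp only [List.map_cons, List.nil_append, List.append_assoc, List.singleton_append, ← hi]

-- ===== VERDICT (by name: the statement is the Claim_ definition above) =====
theorem formatOS_spec : Claim_equal_formatOS := by
  intro S _
  unfold Spec_formatOS formatOS formatOS_alt
  by_cases hS : S = ""
  · subst hS; simp [formatOSLoop]
  · rw [if_neg (by simpa using hS), if_neg (by simpa using hS)]
    have hsplit : (PySem.Str.split? S "/").getD []
        = (pvSplit [] S.toList).map String.ofList := by
      simp [PySem.Str.split?, PySem.Chars.split?, splitOn_char]
    rw [hsplit, PySem.Str.count_eq]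
    have : PySem.Chars.count S.toList "/".toList = S.toList.count '/' := by
      simpa using count_char '/' S.toList
    rw [this, Nat.add_comm 1, loop_eq (S.toList.count '/') S [] rfl]
    simp [List.map_map, Function.comp]
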